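-- pv_equiv track=rewrite | github.com/vladalexeco/GetPoints | functions.py | add_n_to_tag
-- ===== SOURCE A (Python) =====
-- def add_n_to_tag(string):
-- 	new = ''
--
-- 	for ind, char in enumerate(string):
-- 		if char == '>' and ind == len(string) - 1:
-- 			new_char = char + '\n'
-- 			new += new_char
-- 		elif char == '>' and string[ind + 1] == '<':
-- 			new_char = char + '\n'
-- 			new += new_char
-- 		else:
-- 			new += char
--
-- 	return new
-- ===== SOURCE B (Python) =====
-- def add_n_to_tag(string):
--     result = string.replace('><', '>\n<')
--     if string.endswith('>'):
--         result += '\n'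
--     return result
-- ===== Notes on version B (the rewrite author's own statement) =====
-- stated objective: faster
-- what changed: Replaced A's index-based per-character scan (enumerate with string[ind+1] lookahead and repeated string concatenation) by a loop-free two-step: one non-overlapping str.replace('><', '>\n<') plus a separate endswith('>') check for a trailing tag.
import Mathlib
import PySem

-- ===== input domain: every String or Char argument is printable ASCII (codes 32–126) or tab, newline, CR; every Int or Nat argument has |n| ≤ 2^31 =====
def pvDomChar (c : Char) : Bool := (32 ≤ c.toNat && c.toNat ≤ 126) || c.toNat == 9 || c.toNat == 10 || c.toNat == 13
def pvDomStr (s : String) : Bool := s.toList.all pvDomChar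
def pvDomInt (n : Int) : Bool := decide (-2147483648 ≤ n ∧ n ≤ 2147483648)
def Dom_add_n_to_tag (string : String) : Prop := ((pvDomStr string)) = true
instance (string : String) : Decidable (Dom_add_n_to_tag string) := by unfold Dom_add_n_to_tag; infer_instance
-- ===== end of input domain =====

-- B replaces A's index-based character scan by a loop-free, idiomatic pair of steps:
-- one non-overlapping replace('><', '>\n<') plus a separate trailing-'>' check.

-- ===== PORT A =====
def add_n_to_tag (string : String) : String :=
  let new : List Char := []
  let new := (PySem.List.enumerate string.toList 0).foldl
    (fun new p =>
      if p.2 = '>' ∧ p.1 = PySem.Str.len string - 1 then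
        new ++ [p.2, '\n']
      else if p.2 = '>' ∧ PySem.Str.pyGet? string (p.1 + 1) = some '<' then
        new ++ [p.2, '\n']
      else
        new ++ [p.2]) new
  String.ofList new

-- ===== PORT B =====
def add_n_to_tag_alt (string : String) : String :=
  let result := PySem.Str.replace string "><" ">\n<"
  if PySem.Str.endswith string ">" then String.ofList (result.toList ++ ['\n'])
  else result

-- ===== PRECONDITION & SPEC =====
def Spec_add_n_to_tag (string : String) (out : String) : Prop := out = add_n_to_tag_alt string
instance (string : String) (out : String) : Decidable (Spec_add_n_to_tag string out) := by unfold Spec_add_n_to_tag; infer_instance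

-- ===== CLAIM (what is proved, stated in full; the proofs are below) =====
def Claim_equal_add_n_to_tag : Prop := ∀ (string : String), Dom_add_n_to_tag string → Spec_add_n_to_tag string (add_n_to_tag string)

-- ===== LEMMAS AND PROOFS =====

/-- Reference recursion: newline after a `'>'` that is last or followed by `'<'`. -/
def nlAfter : List Char → List Char
  | [] => []
  | c :: t =>
      (if c = '>' ∧ (t = [] ∨ t.head? = some '<') then [c, '\n'] else [c]) ++ nlAfter t

/-- The image of the non-overlapping replace of `"><"` by `">\n<"`. -/
def repScan : List Char → List Char
  | [] => []
  | [c] => [c]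
  | c :: d :: t =>
      if c = '>' ∧ d = '<' then c :: '\n' :: d :: repScan t
      else c :: repScan (d :: t)

lemma foldA (cs : List Char) :
    ∀ (suf pre : List Char) (acc : List Char), cs = pre ++ suf →
    (PySem.List.enumerate suf (pre.length : Int)).foldl
      (fun new p =>
        if p.2 = '>' ∧ p.1 = (cs.length : Int) - 1 then new ++ [p.2, '\n']
        else if p.2 = '>' ∧ PySem.Chars.pyGet? cs (p.1 + 1) = some '<' then new ++ [p.2, '\n']
        else new ++ [p.2]) acc = acc ++ nlAfter suf := by
  intro suf
  induction suf with
  | nil => intro pre acc h; simp [PySem.List.enumerate_nil, nlAfter]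
  | cons c t ih =>
    intro pre acc h
    rw [PySem.List.enumerate_cons, List.foldl_cons]
    have hlen : cs.length = pre.length + 1 + t.length := by
      subst h; simp; omega
    have hidx : ((pre.length : Int) + 1) = ((pre.length + 1 : Nat) : Int) := by push_cast; ring
    have hget : PySem.Chars.pyGet? cs ((pre.length : Int) + 1) = t.head? := by
      rw [hidx]
      simp only [PySem.Chars.pyGet?, PySem.List.pyGet?_natCast]
      subst h
      rw [List.getElem?_append_right (by omega)]
      simp [List.head?_eq_getElem?]
    have henum : PySem.List.enumerate t ((pre.length : Int) + 1)
        = PySem.List.enumerate t (((pre ++ [c]).length : Nat) : Int) := by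
      simp
    have hstep : ∀ acc' : List Char,
        (PySem.List.enumerate t ((pre.length : Int) + 1)).foldl
          (fun new p =>
            if p.2 = '>' ∧ p.1 = (cs.length : Int) - 1 then new ++ [p.2, '\n']
            else if p.2 = '>' ∧ PySem.Chars.pyGet? cs (p.1 + 1) = some '<' then new ++ [p.2, '\n']
            else new ++ [p.2]) acc' = acc' ++ nlAfter t := by
      intro acc'
      rw [henum]
      exact ih (pre ++ [c]) acc' (by simp [h])
    by_cases hc : c = '>'
    · by_cases hlast : (pre.length : Int) = (cs.length : Int) - 1
      · have ht : t = [] := by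
          have h2 := hlast; rw [hlen] at h2; push_cast at h2
          have : t.length = 0 := by omega
          exact List.length_eq_zero_iff.mp this
        subst ht
        simp only [hc, hlast, and_self, if_true]
        simp [PySem.List.enumerate_nil, nlAfter]
      · have ht : t ≠ [] := by
          intro h0; subst h0; simp at hlen; apply hlast; rw [hlen]; push_cast; ring
        simp only [hc, hlast, and_false, if_false, true_and, hget]
        by_cases hh : t.head? = some '<'
        · simp only [hh, if_true, hstep]
          simp [nlAfter, ht, hh]
        · simp only [hh, if_false, hstep]
          simp [nlAfter, ht, hh]
    · simp only [hc, false_and, if_false, hstep]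
      simp [nlAfter, hc]

lemma go_eq : ∀ (fuel : Nat) (l acc : List Char), l.length ≤ fuel →
    PySem.Chars.replace.go ['>', '<'] ['>', '\n', '<'] fuel l acc
      = acc.reverse ++ repScan l := by
  intro fuel
  induction fuel with
  | zero =>
    intro l acc h
    have : l = [] := List.length_eq_zero_iff.mp (Nat.le_zero.mp h)
    subst this
    rw [PySem.Chars.replace.go.eq_def]
    simp [repScan]
  | succ n ih =>
    intro l acc h
    match l with
    | [] => rw [PySem.Chars.replace.go.eq_def]; simp [repScan]
    | [c] =>
      rw [PySem.Chars.replace.go.eq_def]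
      have hp : List.isPrefixOf ['>', '<'] [c] = false := by
        simp [List.isPrefixOf]
      simp only [hp, Bool.false_eq_true, if_false]
      rw [ih [] _ (by simp)]
      simp [repScan]
    | c :: d :: t =>
      rw [PySem.Chars.replace.go.eq_def]
      by_cases hcd : c = '>' ∧ d = '<'
      · obtain ⟨hc, hd⟩ := hcd
        subst hc; subst hd
        have hp : List.isPrefixOf ['>', '<'] ('>' :: '<' :: t) = true := by
          simp [List.isPrefixOf]
        simp only [hp, if_true]
        have hd2 : List.drop ['>', '<'].length ('>' :: '<' :: t) = t := rfl
        rw [hd2, ih t _ (by simp at h ⊢; omega)]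
        simp [repScan]
      · have hp : List.isPrefixOf ['>', '<'] (c :: d :: t) = false := by
          by_cases hc : c = '>'
          · have hd : ¬ d = '<' := fun hd => hcd ⟨hc, hd⟩
            have hbd : ('<' == d) = false := beq_eq_false_iff_ne.mpr (Ne.symm hd)
            simp [List.isPrefixOf, hbd]
          · have hbc : ('>' == c) = false := beq_eq_false_iff_ne.mpr (Ne.symm hc)
            simp [List.isPrefixOf, hbc]
        simp only [hp, Bool.false_eq_true, if_false]
        rw [ih (d :: t) _ (by simp at h ⊢; omega)]
        rw [repScan]
        simp [hcd]

lemma nl_eq_rep : ∀ l : List Char,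
    nlAfter l = repScan l ++ (if l.getLast? = some '>' then ['\n'] else []) := by
  intro l
  induction l using repScan.induct with
  | case1 => simp [nlAfter, repScan]
  | case2 c =>
    by_cases hc : c = '>'
    · subst hc; simp [nlAfter, repScan]
    · simp [nlAfter, repScan, hc]
  | case3 c d t hcd ih =>
    obtain ⟨hc, hd⟩ := hcd
    subst hc; subst hd
    rw [repScan]
    simp only [and_self, if_true]
    rw [show nlAfter ('>' :: '<' :: t) = ['>', '\n'] ++ nlAfter ('<' :: t) by
      simp [nlAfter]]
    rw [show nlAfter ('<' :: t) = ['<'] ++ nlAfter t by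
      cases t <;> simp [nlAfter]]
    rw [ih]
    cases t with
    | nil => simp
    | cons e es => simp [List.getLast?_cons_cons]
  | case4 c d t hcd ih =>
    rw [repScan]
    simp only [hcd, if_false]
    rw [show nlAfter (c :: d :: t) = [c] ++ nlAfter (d :: t) by
      rw [nlAfter]
      simp [hcd]]
    rw [ih]
    simp [List.getLast?_cons_cons]

lemma foldA0 (cs : List Char) (acc : List Char) :
    (PySem.List.enumerate cs 0).foldl
      (fun new p =>
        if p.2 = '>' ∧ p.1 = (cs.length : Int) - 1 then new ++ [p.2, '\n']
        else if p.2 = '>' ∧ PySem.Chars.pyGet? cs (p.1 + 1) = some '<' then new ++ [p.2, '\n']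
        else new ++ [p.2]) acc = acc ++ nlAfter cs := by
  have h := foldA cs cs [] acc rfl
  simpa using h

lemma endswith_gt (l : List Char) :
    PySem.Chars.endswith l ['>'] = true ↔ l.getLast? = some '>' := by
  rw [PySem.Chars.endswith_iff, List.getLast?_eq_some_iff]
  constructor
  · rintro ⟨p, hp⟩; exact ⟨p, hp.symm⟩
  · rintro ⟨p, hp⟩; exact ⟨p, hp.symm⟩

-- ===== VERDICT (by name: the statement is the Claim_ definition above) =====
theorem add_n_to_tag_spec : Claim_equal_add_n_to_tag := by
  intro string _
  unfold Spec_add_n_to_tag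
  -- A's side computes nlAfter of the character list
  have hA : add_n_to_tag string = String.ofList (nlAfter string.toList) := by
    unfold add_n_to_tag
    simp only [PySem.Str.len, PySem.Str.pyGet?]
    have h0 := foldA0 string.toList []
    simp only [List.nil_append] at h0
    exact congrArg String.ofList h0
  -- B's side: the replace produces repScan, plus the trailing-'>' newline
  have hrep : (PySem.Str.replace string "><" ">\n<").toList = repScan string.toList := by
    simp only [PySem.Str.replace, String.toList_ofList]
    have h1 : ("><" : String).toList = ['>', '<'] := by decide
    have h2 : (">\n<" : String).toList = ['>', '\n', '<'] := by decide
    rw [h1, h2]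
    rw [PySem.Chars.replace]
    simp only [List.isEmpty_cons, Bool.false_eq_true, if_false]
    rw [go_eq string.toList.length string.toList [] (le_refl _)]
    simp
  rw [hA]
  unfold add_n_to_tag_alt
  by_cases hend : PySem.Str.endswith string ">" = true
  · rw [if_pos hend]
    rw [hrep]
    have hlast : string.toList.getLast? = some '>' := by
      rw [← endswith_gt]
      simpa [PySem.Str.endswith] using hend
    rw [nl_eq_rep, hlast]
    simp
  · rw [if_neg hend]
    have hlast : ¬ string.toList.getLast? = some '>' := by
      rw [← endswith_gt]
      simpa [PySem.Str.endswith] using hend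
    rw [nl_eq_rep string.toList, if_neg hlast]
    simp only [List.append_nil]
    rw [← hrep]
    rw [String.ofList_toList]
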